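-- pv_equiv track=rewrite | github.com/esungul/salesforce-conflict-analyzer | copado-validator/backend/parse_matrix_custom.py | map_attribute_code
-- ===== SOURCE A (Python) =====
-- def map_attribute_code(attribute_name):
--     """Map attribute names to codes - try all mappings
--
--     Since we don't know which catalog a product belongs to,
--     we try mapping against all known mappings.
--     """
--
--     all_mappings = {
--         "PRB2C_Mobile_Phones_catalog": {
--             "Color": "Color",
--             "Capacity": "PR_B2C_Mb_ATT_Capacity",
--         },
--         "Tablet": {
--             "Size": "PR_B2C_ATT_Size",
--             "Capacity": "PR_B2C_Mb_ATT_Capacity",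
--             "Color": "Color",
--         },
--         "AppleWatch": {
--             "Size": "PR_B2C_ATT_Size",
--             "Case": "PR_B2C_Mb_ATT_Case",
--             "Band": "PR_B2C_ATT_Band_Type",
--         },
--     }
--
--     # Try to find mapping in any catalog
--     for catalog_mapping in all_mappings.values():
--         if attribute_name in catalog_mapping:
--             return catalog_mapping[attribute_name]
--
--     # Not found in any mapping
--     return None
-- ===== SOURCE B (Python) =====
-- # Same mapping as one flat pre-merged dict: a single lookup instead of a loop over catalogs.
-- _MERGED = {
--     "Color": "Color",
--     "Capacity": "PR_B2C_Mb_ATT_Capacity",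
--     "Size": "PR_B2C_ATT_Size",
--     "Case": "PR_B2C_Mb_ATT_Case",
--     "Band": "PR_B2C_ATT_Band_Type",
-- }
--
-- def map_attribute_code(attribute_name):
--     return _MERGED.get(attribute_name)
-- ===== Notes on version B (the rewrite author's own statement) =====
-- stated objective: simpler
-- what changed: Replaces the loop over three per-catalog dicts (membership test then indexing) by one pre-merged flat dict and a single .get lookup; duplicate keys across catalogs map to identical values, so the merge is well-defined.
import Mathlib
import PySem

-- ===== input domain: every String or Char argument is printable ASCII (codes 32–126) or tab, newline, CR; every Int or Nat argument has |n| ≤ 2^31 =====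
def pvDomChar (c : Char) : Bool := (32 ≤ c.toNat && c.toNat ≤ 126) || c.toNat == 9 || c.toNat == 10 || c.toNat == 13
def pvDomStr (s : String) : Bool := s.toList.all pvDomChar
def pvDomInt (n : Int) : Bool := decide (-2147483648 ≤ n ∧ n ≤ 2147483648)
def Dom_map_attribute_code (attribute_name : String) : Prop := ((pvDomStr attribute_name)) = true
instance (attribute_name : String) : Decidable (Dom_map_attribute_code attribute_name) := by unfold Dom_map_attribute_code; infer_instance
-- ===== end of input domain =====

-- B merges the three per-catalog dicts into one flat dict and does a single lookup (simpler: no loop).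


-- ===== PORT A =====
-- literal transliteration: dict of dicts, loop over .values(), membership test then indexing
def map_attribute_code (attribute_name : String) : Option String :=
  let all_mappings : PySem.Dict String (PySem.Dict String String) :=
    PySem.Dict.mk
      [ ("PRB2C_Mobile_Phones_catalog", PySem.Dict.mk
          [ ("Color", "Color"),
            ("Capacity", "PR_B2C_Mb_ATT_Capacity") ]),
        ("Tablet", PySem.Dict.mk
          [ ("Size", "PR_B2C_ATT_Size"),
            ("Capacity", "PR_B2C_Mb_ATT_Capacity"),
            ("Color", "Color") ]),
        ("AppleWatch", PySem.Dict.mk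
          [ ("Size", "PR_B2C_ATT_Size"),
            ("Case", "PR_B2C_Mb_ATT_Case"),
            ("Band", "PR_B2C_ATT_Band_Type") ]) ]
  -- the for-loop with early return: first catalog containing the key wins
  (all_mappings.values.find? (fun catalog_mapping => catalog_mapping.contains attribute_name)).bind
    (fun catalog_mapping => catalog_mapping.get? attribute_name)

-- ===== PORT B =====
-- one flat pre-merged dict, single lookup
def pvMerged : PySem.Dict String String :=
  PySem.Dict.mk
    [ ("Color", "Color"),
      ("Capacity", "PR_B2C_Mb_ATT_Capacity"),
      ("Size", "PR_B2C_ATT_Size"),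
      ("Case", "PR_B2C_Mb_ATT_Case"),
      ("Band", "PR_B2C_ATT_Band_Type") ]

def map_attribute_code_alt (attribute_name : String) : Option String :=
  pvMerged.get? attribute_name

-- ===== PRECONDITION & SPEC =====
def Spec_map_attribute_code (attribute_name : String) (out : Option String) : Prop := out = map_attribute_code_alt attribute_name
instance (attribute_name : String) (out : Option String) : Decidable (Spec_map_attribute_code attribute_name out) := by unfold Spec_map_attribute_code; infer_instance

-- ===== CLAIM (what is proved, stated in full; the proofs are below) =====
def Claim_equal_map_attribute_code : Prop := ∀ (attribute_name : String), Dom_map_attribute_code attribute_name → Spec_map_attribute_code attribute_name (map_attribute_code attribute_name)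

-- ===== LEMMAS AND PROOFS =====

-- ===== VERDICT (by name: the statement is the Claim_ definition above) =====
theorem map_attribute_code_spec : Claim_equal_map_attribute_code := by
  intro s _
  unfold Spec_map_attribute_code map_attribute_code map_attribute_code_alt pvMerged
  by_cases h1 : s = "Color"
  · subst h1; decide
  by_cases h2 : s = "Capacity"
  · subst h2; decide
  by_cases h3 : s = "Size"
  · subst h3; decide
  by_cases h4 : s = "Case"
  · subst h4; decide
  by_cases h5 : s = "Band"
  · subst h5; decide
  simp [PySem.Dict.values_mk, PySem.Dict.contains_mk, List.find?,
    beq_eq_false_iff_ne.mpr (Ne.symm h1), beq_eq_false_iff_ne.mpr (Ne.symm h2),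
    beq_eq_false_iff_ne.mpr (Ne.symm h3), beq_eq_false_iff_ne.mpr (Ne.symm h4),
    beq_eq_false_iff_ne.mpr (Ne.symm h5), PySem.Dict.get?]
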